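-- pv_equiv track=rewrite | github.com/Subhan-khaliq/Artificial-Intelligence-Algorithms | K_Means_Clustering.py | making_lists_for_clusters
-- ===== SOURCE A (Python) =====
-- def making_lists_for_clusters(k,l):
--     if k==1:
--         l.append(k)
--         return l
--     else:
--         l.append(k)
--         making_lists_for_clusters(k-1,l)
--         return l
-- ===== SOURCE B (Python) =====
-- def making_lists_for_clusters(k, l):
--     l.extend(range(k, 0, -1))
--     return l
-- ===== Notes on version B (the rewrite author's own statement) =====
-- stated objective: idiomatic
-- what changed: Replaces the unary recursion (append k, recurse on k-1) with a single extend over range(k,0,-1) onto the same list.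
import Mathlib
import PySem

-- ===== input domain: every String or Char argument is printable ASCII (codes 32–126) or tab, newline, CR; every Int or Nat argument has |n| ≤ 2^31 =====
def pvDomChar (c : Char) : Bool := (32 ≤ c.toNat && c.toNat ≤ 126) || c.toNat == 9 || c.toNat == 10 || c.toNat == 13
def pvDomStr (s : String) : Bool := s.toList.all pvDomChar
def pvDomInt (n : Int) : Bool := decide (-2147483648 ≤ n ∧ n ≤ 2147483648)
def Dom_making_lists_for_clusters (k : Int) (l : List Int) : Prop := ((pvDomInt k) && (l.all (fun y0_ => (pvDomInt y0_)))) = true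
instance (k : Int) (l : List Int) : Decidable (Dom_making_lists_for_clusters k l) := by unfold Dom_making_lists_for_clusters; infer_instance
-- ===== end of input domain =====

-- B replaces the unary recursion with one extend over range(k,0,-1); B mutates l in place like A.

-- ===== PORT A =====
-- A: if k==1 append and return, else append k and recurse on k-1 (the mutated l is the
-- returned value, i.e. the recursive call's result). For k < 1 Python recurses forever
-- (RecursionError); the 'k < 1' branch below is only a termination guard, outside Pre_.
def making_lists_for_clusters (k : Int) (l : List Int) : List Int :=
  if k = 1 then l ++ [k]
  else if k < 1 then l ++ [k]
  else making_lists_for_clusters (k - 1) (l ++ [k])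
termination_by k.toNat
decreasing_by omega

-- ===== PORT B =====
def making_lists_for_clusters_alt (k : Int) (l : List Int) : List Int :=
  l ++ PySem.List.pyRange k 0 (-1)

-- ===== PRECONDITION & SPEC =====
-- Pre_ excludes k ≤ 0, where Python A raises RecursionError (unbounded recursion).
def Pre_making_lists_for_clusters (k : Int) (l : List Int) : Prop := 1 ≤ k
instance (k : Int) (l : List Int) : Decidable (Pre_making_lists_for_clusters k l) := by unfold Pre_making_lists_for_clusters; infer_instance
def pvWitness_making_lists_for_clusters : Int × List Int := (3, [7, 8])

def Spec_making_lists_for_clusters (k : Int) (l : List Int) (out : List Int) : Prop := out = making_lists_for_clusters_alt k l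
instance (k : Int) (l : List Int) (out : List Int) : Decidable (Spec_making_lists_for_clusters k l out) := by unfold Spec_making_lists_for_clusters; infer_instance

-- ===== CLAIM (what is proved, stated in full; the proofs are below) =====
def Claim_equal_making_lists_for_clusters : Prop := ∀ (k : Int) (l : List Int), Dom_making_lists_for_clusters k l → Pre_making_lists_for_clusters k l → Spec_making_lists_for_clusters k l (making_lists_for_clusters k l)
-- ===== LEMMAS AND PROOFS =====

-- range(k, 0, -1) is [k, k-1, …, 1], i.e. (List.range k.toNat).map (fun j => k - j)
theorem pyRange_down (k : Int) (hk : 1 ≤ k) :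
    PySem.List.pyRange k 0 (-1) = (List.range k.toNat).map (fun j : Nat => k - (j : Int)) := by
  unfold PySem.List.pyRange
  rw [if_neg (by norm_num), if_neg (by norm_num), if_pos (by omega)]
  have h : ((k - 0 + -(-1) - 1) / -(-1) : Int) = k := by
    norm_num
  rw [h]
  apply List.map_congr_left
  intro j _
  ring

theorem portA_closed (n : Nat) : ∀ (k : Int), k.toNat = n → 1 ≤ k → ∀ (l : List Int),
    making_lists_for_clusters k l = l ++ (List.range n).map (fun j : Nat => k - (j : Int)) := by
  induction n with
  | zero => intro k hkn hk; omega
  | succ m ih =>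
    intro k hkn hk l
    rw [making_lists_for_clusters]
    by_cases h1 : k = 1
    · subst h1
      have : m = 0 := by omega
      subst this
      simp
    · rw [if_neg h1, if_neg (by omega)]
      rw [ih (k - 1) (by omega) (by omega)]
      rw [List.range_succ_eq_map]
      simp only [List.map_cons, List.map_map, List.append_assoc, List.singleton_append,
        Function.comp]
      congr 2
      · omega
      · apply List.map_congr_left
        intro j _
        simp only [Function.comp_apply]
        push_cast
        ring

-- ===== VERDICT (by name: the statement is the Claim_ definition above) =====
theorem making_lists_for_clusters_spec : Claim_equal_making_lists_for_clusters := by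
  intro k l _ hk
  unfold Spec_making_lists_for_clusters making_lists_for_clusters_alt
  rw [pyRange_down k hk, portA_closed k.toNat k rfl hk l]
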